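-- pv_equiv track=rewrite | github.com/hiparkgss/CSES_Problem_practice | Repetitions.py | find_repetition
-- ===== SOURCE A (Python) =====
-- def find_repetition(s):  # second try
--     # list with values of repetition
--     # initialisation
--     result = 1
--     current_count = 1
--     previous_seq = s[0]
--
--     # starting with the second DNA seq
--     for seq in s[1:]:
--         if seq == previous_seq:  # current seq matches the previous
--             current_count = current_count + 1
--             result = max(current_count, result)
--
--         else:  # current seq does not match the previous
--             current_count = 1  # start repetition length again from 1
--
--         previous_seq = seq  # reset the previous_seq to the current seq for the next iteration
--
--     return result
-- ===== SOURCE B (Python) =====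
-- def find_repetition(s):
--     # Two-phase: collect the boundary positions where the run of equal
--     # characters changes, then the answer is the largest gap between
--     # consecutive boundaries.
--     n = len(s)
--     edges = [0] + [i for i in range(1, n) if s[i] != s[i - 1]] + [n]
--     return max(b - a for a, b in zip(edges, edges[1:]))
-- ===== Notes on version B (the rewrite author's own statement) =====
-- stated objective: alternative
-- what changed: Instead of a single scan maintaining a running counter and running maximum, B builds the list of run-boundary positions (indices where s[i] != s[i-1]) and returns the maximum difference between consecutive boundaries.
import Mathlib
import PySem

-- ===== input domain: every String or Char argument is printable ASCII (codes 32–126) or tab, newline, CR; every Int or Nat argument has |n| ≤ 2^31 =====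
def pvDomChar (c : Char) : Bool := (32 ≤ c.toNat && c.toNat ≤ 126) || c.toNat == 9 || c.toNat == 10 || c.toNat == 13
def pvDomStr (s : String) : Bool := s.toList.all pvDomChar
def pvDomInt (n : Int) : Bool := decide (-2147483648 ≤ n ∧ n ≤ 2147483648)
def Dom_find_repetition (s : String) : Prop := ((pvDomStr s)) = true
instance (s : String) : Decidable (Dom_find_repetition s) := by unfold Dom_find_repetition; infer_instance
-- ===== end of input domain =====

-- B replaces A's running-counter/running-maximum scan by a two-phase boundary computation
-- (list the positions where the run changes, then take the maximum gap between consecutive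
-- boundaries); same cost, a genuinely different decomposition.

-- ===== PORT A =====
-- the for-loop of A: state (result, current_count, previous_seq)
def pvFoldA : List Char → Int → Int → Char → Int
  | [], result, _, _ => result
  | seq :: rest, result, current_count, previous_seq =>
    if seq = previous_seq then
      pvFoldA rest (max (current_count + 1) result) (current_count + 1) seq
    else
      pvFoldA rest result 1 seq

def find_repetition (s : String) : Int :=
  match PySem.Str.pyGet? s 0 with
  | none => 0      -- Python raises IndexError here (s[0] on ""); outside Pre_
  | some previous_seq =>
    pvFoldA (PySem.List.slice s.toList (some 1) none) 1 1 previous_seq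

-- ===== PORT B =====
def find_repetition_alt (s : String) : Int :=
  let l := s.toList
  let n : Int := l.length
  let edges : List Int :=
    [0] ++ (PySem.List.pyRange 1 n 1).filter
             (fun i => PySem.List.pyGet? l i ≠ PySem.List.pyGet? l (i - 1)) ++ [n]
  let diffs : List Int := (edges.zip edges.tail).map (fun p => p.2 - p.1)
  match diffs with
  | [] => 0        -- unreachable: edges always has ≥ 2 entries
  | d :: ds => ds.foldl max d   -- Python max of a nonempty sequence

-- ===== PRECONDITION & SPEC =====
-- Pre_ excludes only the empty string, on which A raises IndexError at s[0].
def Pre_find_repetition (s : String) : Prop := s.toList ≠ []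
instance (s : String) : Decidable (Pre_find_repetition s) := by unfold Pre_find_repetition; infer_instance
def pvWitness_find_repetition : String := "aabba"

def Spec_find_repetition (s : String) (out : Int) : Prop := out = find_repetition_alt s
instance (s : String) (out : Int) : Decidable (Spec_find_repetition s out) := by unfold Spec_find_repetition; infer_instance

-- ===== CLAIM (what is proved, stated in full; the proofs are below) =====
def Claim_equal_find_repetition : Prop := ∀ (s : String), Dom_find_repetition s → Pre_find_repetition s → Spec_find_repetition s (find_repetition s)

-- ===== LEMMAS AND PROOFS =====

-- pivot spec: pvRuns c k xs = run lengths of the runs of (c repeated k times ++ xs)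
def pvRuns : Char → Int → List Char → List Int
  | _, k, [] => [k]
  | c, k, x :: xs => if x = c then pvRuns c (k + 1) xs else k :: pvRuns x 1 xs

theorem pv_le_foldl_max (l : List Int) (a : Int) : a ≤ l.foldl max a := by
  induction l generalizing a with
  | nil => simp
  | cons x l ih => exact le_trans (le_max_left a x) (ih _)

theorem pv_foldl_max_max (l : List Int) (a b : Int) :
    l.foldl max (max a b) = max a (l.foldl max b) := by
  induction l generalizing a b with
  | nil => simp
  | cons x l ih =>
    simp only [List.foldl]
    rw [max_assoc, ih]

-- the head of pvRuns is at least k, and pvRuns is never empty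
theorem pvRuns_head (xs : List Char) (c : Char) (k : Int) :
    ∃ h rest, pvRuns c k xs = h :: rest ∧ k ≤ h := by
  induction xs generalizing c k with
  | nil => exact ⟨k, [], rfl, le_refl _⟩
  | cons x xs ih =>
    by_cases hx : x = c
    · obtain ⟨h, rest, he, hk⟩ := ih c (k + 1)
      exact ⟨h, rest, by simp [pvRuns, hx, he], by omega⟩
    · exact ⟨k, pvRuns x 1 xs, by simp [pvRuns, hx], le_refl _⟩

-- A's loop is the fold of max over the run lengths
theorem pvFoldA_eq_runs (xs : List Char) (res cnt : Int) (prev : Char)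
    (h1 : 1 ≤ cnt) (h2 : cnt ≤ res) :
    pvFoldA xs res cnt prev = (pvRuns prev cnt xs).foldl max res := by
  induction xs generalizing res cnt prev with
  | nil => simp [pvFoldA, pvRuns, max_eq_left h2]
  | cons x xs ih =>
    by_cases hx : x = prev
    · simp only [pvFoldA, pvRuns, if_pos hx]
      rw [ih _ _ _ (by omega) (le_max_left _ _), hx]
      rw [pv_foldl_max_max]
      obtain ⟨h, rest, he, hk⟩ := pvRuns_head xs prev (cnt + 1)
      have hle : cnt + 1 ≤ (pvRuns prev (cnt + 1) xs).foldl max res := by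
        rw [he]
        simp only [List.foldl]
        exact le_trans (le_trans hk (le_max_right res h)) (pv_le_foldl_max _ _)
      exact max_eq_right hle
    · simp only [pvFoldA, pvRuns, if_neg hx]
      rw [ih _ _ _ (le_refl 1) (by omega)]
      simp only [List.foldl]
      rw [max_eq_left h2]

-- boundary positions of the run changes inside (prev at position j-1, then xs from position j)
def pvBreaks : Char → Int → List Char → List Int
  | _, _, [] => []
  | c, j, x :: xs => if x = c then pvBreaks x (j + 1) xs else j :: pvBreaks x (j + 1) xs

-- B's filtered index range equals the structural boundary list
theorem pv_filter_eq_breaks (l : List Char) (xs : List Char) :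
    ∀ (c : Char) (j : Nat), 1 ≤ j → l.drop j = xs → l[j - 1]? = some c →
      (PySem.List.pyRange (j : Int) (l.length : Int) 1).filter
          (fun i => PySem.List.pyGet? l i ≠ PySem.List.pyGet? l (i - 1))
        = pvBreaks c (j : Int) xs := by
  induction xs generalizing l with
  | nil =>
    intro c j hj hd hg
    have h1 : l.length ≤ j := List.drop_eq_nil_iff.mp hd
    have hb : (l.length : Int) ≤ (j : Int) := by exact_mod_cast h1
    rw [PySem.List.pyRange_one_eq_nil hb]
    rfl
  | cons x xs ih =>
    intro c j hj hd hg
    have hjlt : j < l.length := by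
      by_contra h
      rw [List.drop_eq_nil_iff.mpr (by omega)] at hd
      simp at hd
    have hgx : l[j]? = some x := by
      rw [← List.head?_drop, hd]
      rfl
    have hcast : ((j : Int)) < (l.length : Int) := by exact_mod_cast hjlt
    rw [PySem.List.pyRange_one_cons hcast]
    have hjm1 : ((j : Int) - 1) = ((j - 1 : Nat) : Int) := by omega
    have hpg : PySem.List.pyGet? l ((j : Int) - 1) = some c := by
      rw [hjm1]; simp [hg]
    have hstep : ((j : Int) + 1) = ((j + 1 : Nat) : Int) := by omega
    have hdrop : l.drop (j + 1) = xs := by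
      rw [← List.tail_drop, hd]
      rfl
    have hget : l[(j + 1) - 1]? = some x := by simpa using hgx
    by_cases hx : x = c
    · rw [List.filter_cons_of_neg (by simp [hpg, hgx, hx])]
      rw [hstep, ih l x (j + 1) (by omega) hdrop hget]
      simp [pvBreaks, hx, ← hstep]
    · rw [List.filter_cons_of_pos (by simp [hpg, hgx, hx])]
      rw [hstep, ih l x (j + 1) (by omega) hdrop hget]
      simp [pvBreaks, hx, ← hstep]

-- adjacent differences, exactly as port B computes them
def pvDiffs (l : List Int) : List Int := (l.zip l.tail).map (fun p => p.2 - p.1)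

theorem pvDiffs_cons_cons (a b : Int) (t : List Int) :
    pvDiffs (a :: b :: t) = (b - a) :: pvDiffs (b :: t) := by
  simp [pvDiffs]

-- the adjacent differences of the boundary list are the run lengths
theorem pv_diffs_breaks (xs : List Char) :
    ∀ (c : Char) (j e : Int),
      pvDiffs (e :: (pvBreaks c j xs ++ [j + (xs.length : Int)])) = pvRuns c (j - e) xs := by
  induction xs with
  | nil => intro c j e; simp [pvDiffs, pvBreaks, pvRuns]
  | cons x xs ih =>
    intro c j e
    have hlen : (j + ((x :: xs).length : Int)) = (j + 1) + (xs.length : Int) := by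
      simp; omega
    by_cases hx : x = c
    · rw [hlen]
      simp only [pvBreaks, if_pos hx, pvRuns]
      rw [hx] at *
      rw [ih c (j + 1) e]
      have h1 : j + 1 - e = j - e + 1 := by omega
      rw [h1]
    · simp only [pvBreaks, pvRuns, if_neg hx]
      rw [hlen, List.cons_append, pvDiffs_cons_cons, ih x (j + 1) j]
      have h1 : j + 1 - j = 1 := by omega
      rw [h1]

-- ===== VERDICT (by name: the statement is the Claim_ definition above) =====
theorem find_repetition_spec : Claim_equal_find_repetition := by
  intro s _ hpre
  unfold Spec_find_repetition
  obtain ⟨c, xs, hl⟩ : ∃ c xs, s.toList = c :: xs := by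
    cases h : s.toList with
    | nil => exact absurd h hpre
    | cons c xs => exact ⟨c, xs, rfl⟩
  -- evaluate port A
  have hA : find_repetition s = (pvRuns c 1 xs).foldl max 1 := by
    unfold find_repetition
    have hc0 : PySem.Str.pyGet? s 0 = some c := by
      rw [show (0 : Int) = ((0 : Nat) : Int) from rfl, PySem.Str.pyGet?_natCast, hl]
      rfl
    rw [hc0]
    rw [show PySem.List.slice s.toList (some 1) none = xs by
      rw [PySem.List.slice_from_one, hl]; rfl]
    exact pvFoldA_eq_runs xs 1 1 c (le_refl 1) (le_refl 1)
  -- evaluate port B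
  have hfilter : (PySem.List.pyRange (1 : Int) (s.toList.length : Int) 1).filter
      (fun i => decide (PySem.List.pyGet? s.toList i ≠ PySem.List.pyGet? s.toList (i - 1)))
      = pvBreaks c 1 xs := by
    have h1 := pv_filter_eq_breaks s.toList xs c 1 (le_refl 1)
      (by rw [hl]; rfl) (by rw [hl]; rfl)
    simpa using h1
  have hn : (s.toList.length : Int) = 1 + (xs.length : Int) := by
    rw [hl]; simp; omega
  have hdiffs := pv_diffs_breaks xs c 1 0
  simp only [pvDiffs] at hdiffs
  obtain ⟨h, rest, he, hk⟩ := pvRuns_head xs c 1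
  have hB : find_repetition_alt s = rest.foldl max h := by
    unfold find_repetition_alt
    rw [hn] at hfilter
    simp only [hn, hfilter, List.nil_append, List.cons_append]
    simp only [sub_zero] at hdiffs
    rw [hdiffs, he]
  rw [hA, hB, he]
  simp only [List.foldl]
  rw [max_comm 1 h, max_eq_left (by omega : (1:Int) ≤ h)]
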